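-- pv_equiv track=rewrite | github.com/Warriorchief/Space-Cows-Project | CowsProjCDG.py | fill_one_ship
-- ===== SOURCE A (Python) =====
-- def fill_one_ship(cows,limit):
--     """
--     fill_one_ship acts as a subroutine of greedy_cow_transport. It picks the
--     heavist available cow, sees whether it will fit, and if so loads it. If it
--     doesn't fit, it picks the next heaviest cow. It repeats this process until
--     the ship if full becasue it's either reached its maximum capacity of none
--     of remaining cows will fit onto it.
--     """
--     loaded = []
--     weight=0
--     holder=cows.copy()
--     while weight<limit and len(holder)>0:
--         fat = max(list(holder.values()))
--         fatIndex = list(holder.values()).index(fat)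
--         fatName = list(holder.keys())[fatIndex]
--         if fat+weight<=limit:
--             loaded.append(fatName)
--             weight+=fat
--             del holder[fatName]
--         else:
--             del holder[fatName]
--     return loaded
-- ===== SOURCE B (Python) =====
-- def fill_one_ship(cows, limit):
--     loaded = []
--     weight = 0
--     for name, w in sorted(cows.items(), key=lambda kv: kv[1], reverse=True):
--         if weight >= limit:
--             break
--         if weight + w <= limit:
--             loaded.append(name)
--             weight += w
--     return loaded
-- ===== Notes on version B (the rewrite author's own statement) =====
-- stated objective: faster
-- what changed: A repeatedly rescans the remaining dict for its heaviest cow and deletes it (a selection-sort-style O(n^2) loop); B sorts the cows once by descending weight (stable sort, ties in dict order) and loads them in a single greedy pass. The Lean precondition requires distinct cow names, since the Python argument is a dict and an association list with duplicate keys encodes no dict.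
import Mathlib
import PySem

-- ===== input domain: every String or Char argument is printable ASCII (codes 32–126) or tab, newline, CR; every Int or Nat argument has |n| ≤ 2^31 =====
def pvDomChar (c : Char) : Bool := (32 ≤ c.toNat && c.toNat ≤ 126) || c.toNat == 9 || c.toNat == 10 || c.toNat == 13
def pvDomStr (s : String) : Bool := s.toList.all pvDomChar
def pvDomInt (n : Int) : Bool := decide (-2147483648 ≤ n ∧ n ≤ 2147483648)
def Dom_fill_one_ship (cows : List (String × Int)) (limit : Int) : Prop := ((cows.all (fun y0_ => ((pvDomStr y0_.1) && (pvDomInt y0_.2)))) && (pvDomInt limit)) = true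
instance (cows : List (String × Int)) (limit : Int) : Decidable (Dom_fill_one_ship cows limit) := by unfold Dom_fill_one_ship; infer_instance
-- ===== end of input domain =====

-- B sorts the cows once by descending weight (stable) and loads in one greedy pass,
-- replacing A's repeated max-scan-and-delete over the remaining dict: objective 'faster' (O(n log n) vs O(n^2)).

-- ===== PORT A =====
-- `del holder[fatName]` on the dict: remove the (unique-keyed) first pair with that key.
def pvDelKey : List (String × Int) → String → List (String × Int)
  | [], _ => []
  | p :: r, k => if p.1 = k then r else p :: pvDelKey r k

-- termination of A's while loop: the delete shrinks the holder (cited in decreasing_by)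
theorem pvDelKey_length_lt (h : List (String × Int)) (k : String)
    (hk : k ∈ h.map Prod.fst) : (pvDelKey h k).length < h.length := by
  induction h with
  | nil => simp at hk
  | cons p r ih =>
    simp only [pvDelKey]
    split
    · simp
    · rename_i hne
      simp only [List.map_cons, List.mem_cons] at hk
      rcases hk with hk | hk
      · exact absurd hk.symm hne
      · simpa using Nat.succ_lt_succ (ih hk)

-- the while loop of A: state (holder, weight, loaded)
def fill_one_ship_go (holder : List (String × Int)) (weight limit : Int) (loaded : List String) : List String :=
  if weight < limit ∧ 0 < holder.length then
    match PySem.List.max? (holder.map Prod.snd) (fun v => v) with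
    | none => loaded  -- unreachable: holder nonempty
    | some fat =>
      match PySem.List.index? (holder.map Prod.snd) fat with
      | none => loaded  -- unreachable: fat is a value of holder
      | some fatIndex =>
        match hn_ : (holder.map Prod.fst)[fatIndex]? with
        | none => loaded  -- unreachable: fatIndex is in range
        | some fatName =>
          if fat + weight ≤ limit then
            fill_one_ship_go (pvDelKey holder fatName) (weight + fat) limit (loaded ++ [fatName])
          else
            fill_one_ship_go (pvDelKey holder fatName) weight limit loaded
  else loaded
termination_by holder.length
decreasing_by
  all_goals
    exact pvDelKey_length_lt _ _ (List.mem_of_getElem? hn_)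

def fill_one_ship (cows : List (String × Int)) (limit : Int) : List String :=
  fill_one_ship_go cows 0 limit []

-- ===== PORT B =====
-- the for-loop of Source B with its 'break' guard
def fill_one_ship_scan (rest : List (String × Int)) (weight limit : Int) (loaded : List String) : List String :=
  match rest with
  | [] => loaded
  | (name, w) :: t =>
    if limit ≤ weight then loaded
    else if weight + w ≤ limit then fill_one_ship_scan t (weight + w) limit (loaded ++ [name])
    else fill_one_ship_scan t weight limit loaded

def fill_one_ship_alt (cows : List (String × Int)) (limit : Int) : List String :=
  fill_one_ship_scan (PySem.List.sorted cows (fun kv => kv.2) true) 0 limit []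

-- ===== PRECONDITION & SPEC =====
-- In Python `cows` is a dict, so its keys are necessarily distinct; an association list with a
-- duplicate key encodes no Python dict, so Pre_ admits exactly the valid dict encodings.
def Pre_fill_one_ship (cows : List (String × Int)) (limit : Int) : Prop :=
  (cows.map Prod.fst).Nodup

instance (cows : List (String × Int)) (limit : Int) : Decidable (Pre_fill_one_ship cows limit) := by
  unfold Pre_fill_one_ship; infer_instance

def pvWitness_fill_one_ship : (List (String × Int)) × Int := ([("Betsy", 3), ("Milo", 2), ("Clover", 4)], 5)

def Spec_fill_one_ship (cows : List (String × Int)) (limit : Int) (out : List String) : Prop := out = fill_one_ship_alt cows limit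
instance (cows : List (String × Int)) (limit : Int) (out : List String) : Decidable (Spec_fill_one_ship cows limit out) := by unfold Spec_fill_one_ship; infer_instance

-- ===== CLAIM (what is proved, stated in full; the proofs are below) =====
def Claim_equal_fill_one_ship : Prop := ∀ (cows : List (String × Int)) (limit : Int), Dom_fill_one_ship cows limit → Pre_fill_one_ship cows limit → Spec_fill_one_ship cows limit (fill_one_ship cows limit)

-- ===== LEMMAS AND PROOFS =====

-- first pair of p :: r attaining the maximal weight (ties: earliest)
def pvFm (p : String × Int) : List (String × Int) → String × Int
  | [] => p
  | q :: r => let m := pvFm q r; if p.2 < m.2 then m else p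

-- p :: r with that pair removed
def pvRmv (p : String × Int) : List (String × Int) → List (String × Int)
  | [] => []
  | q :: r => let m := pvFm q r; if p.2 < m.2 then p :: pvRmv q r else q :: r

theorem pvFoldlMaxComm (l : List Int) (a b : Int) :
    l.foldl max (max a b) = max a (l.foldl max b) := by
  induction l generalizing b with
  | nil => rfl
  | cons x t ih =>
    simp only [List.foldl_cons, max_assoc, ih]

theorem pvFm_snd (r : List (String × Int)) (p : String × Int) :
    (pvFm p r).2 = (r.map Prod.snd).foldl max p.2 := by
  induction r generalizing p with
  | nil => rfl
  | cons q t ih =>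
    simp only [pvFm, List.map_cons, List.foldl_cons]
    rw [pvFoldlMaxComm, ← ih]
    by_cases h : p.2 < (pvFm q t).2 <;> simp [h] <;> omega

theorem pvFm_append (r : List (String × Int)) (p x : String × Int) :
    pvFm p (r ++ [x]) = if (pvFm p r).2 < x.2 then x else pvFm p r := by
  induction r generalizing p with
  | nil => simp [pvFm]
  | cons q t ih =>
    simp only [List.cons_append, pvFm, ih]
    by_cases h1 : (pvFm q t).2 < x.2 <;> by_cases h2 : p.2 < (pvFm q t).2 <;>
      split_ifs <;> simp_all <;> omega

theorem pvRmv_append (r : List (String × Int)) (p x : String × Int) :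
    pvRmv p (r ++ [x]) = if (pvFm p r).2 < x.2 then p :: r else pvRmv p r ++ [x] := by
  induction r generalizing p with
  | nil => simp [pvRmv, pvFm]
  | cons q t ih =>
    simp only [List.cons_append, pvRmv, pvFm, ih, pvFm_append]
    by_cases h1 : (pvFm q t).2 < x.2 <;> by_cases h2 : p.2 < (pvFm q t).2 <;>
      split_ifs <;> simp_all <;> omega

-- sorted(l ++ [x]) is one more insertion into sorted(l)
theorem pvSorted_append (l : List (String × Int)) (x : String × Int) :
    PySem.List.sorted (l ++ [x]) (fun kv => kv.2) true
      = PySem.List.insertBy (fun a b => decide (b.2 < a.2)) x (PySem.List.sorted l (fun kv => kv.2) true) := by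
  rw [PySem.List.sorted_rev_eq_foldl_insertBy, PySem.List.sorted_rev_eq_foldl_insertBy, List.foldl_append]
  rfl

-- the stable descending sort selects pvFm first, then sorts the rest
theorem pvSorted_cons (r : List (String × Int)) (p : String × Int) :
    PySem.List.sorted (p :: r) (fun kv => kv.2) true
      = pvFm p r :: PySem.List.sorted (pvRmv p r) (fun kv => kv.2) true := by
  induction r using List.reverseRecOn generalizing p with
  | nil => rfl
  | append_singleton t x ih =>
    rw [show p :: (t ++ [x]) = (p :: t) ++ [x] from rfl, pvSorted_append, ih,
      pvFm_append, pvRmv_append]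
    by_cases h : (pvFm p t).2 < x.2
    · simp only [if_pos h, PySem.List.insertBy, decide_eq_true_eq, ih]
    · simp only [if_neg h, PySem.List.insertBy, decide_eq_true_eq, pvSorted_append]

-- A's max/index/keys chain computes exactly (pvFm, removal position)
theorem pvChain (p : String × Int) (r : List (String × Int)) :
    ∃ i, PySem.List.max? ((p :: r).map Prod.snd) (fun v => v) = some (pvFm p r).2
      ∧ PySem.List.index? ((p :: r).map Prod.snd) (pvFm p r).2 = some i
      ∧ ((p :: r).map Prod.fst)[i]? = some (pvFm p r).1
      ∧ (p :: r).eraseIdx i = pvRmv p r := by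
  induction r generalizing p with
  | nil =>
    exact ⟨0, by simp [PySem.List.max?_id_cons, pvFm, pvRmv, List.eraseIdx]⟩
  | cons q t ih =>
    obtain ⟨i, hmax, hidx, hget, hrm⟩ := ih q
    have hmv : PySem.List.max? ((p :: q :: t).map Prod.snd) (fun v => v) = some ((pvFm p (q :: t)).2) := by
      rw [show ((p :: q :: t).map Prod.snd) = p.2 :: ((q :: t).map Prod.snd) from rfl,
        PySem.List.max?_id_cons, ← pvFm_snd]
    by_cases h : p.2 < (pvFm q t).2
    · have hfm : pvFm p (q :: t) = pvFm q t := by simp [pvFm, h]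
      refine ⟨i + 1, hmv, ?_, ?_, ?_⟩
      · rw [hfm, show ((p :: q :: t).map Prod.snd) = p.2 :: ((q :: t).map Prod.snd) from rfl,
          PySem.List.index?_cons_of_ne _ (by omega : p.2 ≠ (pvFm q t).2), hidx]
        rfl
      · rw [hfm]; simpa using hget
      · have hr : pvRmv p (q :: t) = p :: pvRmv q t := by simp [pvRmv, h]
        rw [hr, ← hrm]; rfl
    · have hfm : pvFm p (q :: t) = p := by simp [pvFm, h]
      refine ⟨0, hmv, ?_, ?_, ?_⟩
      · rw [hfm, show ((p :: q :: t).map Prod.snd) = p.2 :: ((q :: t).map Prod.snd) from rfl,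
          PySem.List.index?_cons_self]
      · rw [hfm]; rfl
      · have hr : pvRmv p (q :: t) = q :: t := by simp [pvRmv, h]
        rw [hr]; rfl

-- with distinct keys, `del holder[name]` removes exactly the position where name sits
theorem pvDelKey_eraseIdx (h : List (String × Int)) (i : Nat) (name : String)
    (hnd : (h.map Prod.fst).Nodup) (hget : (h.map Prod.fst)[i]? = some name) :
    pvDelKey h name = h.eraseIdx i := by
  induction h generalizing i with
  | nil => simp at hget
  | cons p r ih =>
    cases i with
    | zero =>
      simp only [List.map_cons, List.getElem?_cons_zero, Option.some.injEq] at hget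
      simp [pvDelKey, hget, List.eraseIdx]
    | succ j =>
      simp only [List.map_cons, List.getElem?_cons_succ] at hget
      have hmem : name ∈ r.map Prod.fst := List.mem_of_getElem? hget
      have hne : p.1 ≠ name := by
        simp only [List.map_cons, List.nodup_cons] at hnd
        intro hEq; exact hnd.1 (hEq ▸ hmem)
      simp only [pvDelKey, if_neg hne, List.eraseIdx]
      exact congrArg _ (ih j (by simp only [List.map_cons, List.nodup_cons] at hnd; exact hnd.2) hget)

theorem pvRmv_sublist (p : String × Int) (r : List (String × Int)) :
    (pvRmv p r).Sublist (p :: r) := by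
  obtain ⟨i, _, _, _, hrm⟩ := pvChain p r
  rw [← hrm]; exact List.eraseIdx_sublist _ i

-- one iteration of A's while loop, with the max/index/keys chain resolved
theorem pvGo_step (p : String × Int) (r : List (String × Int)) (weight limit : Int)
    (loaded : List String) (fat : Int) (i : Nat) (name : String)
    (hw : weight < limit)
    (hmax : PySem.List.max? ((p :: r).map Prod.snd) (fun v => v) = some fat)
    (hidx : PySem.List.index? ((p :: r).map Prod.snd) fat = some i)
    (hget : ((p :: r).map Prod.fst)[i]? = some name) :
    fill_one_ship_go (p :: r) weight limit loaded =
      if fat + weight ≤ limit then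
        fill_one_ship_go (pvDelKey (p :: r) name) (weight + fat) limit (loaded ++ [name])
      else fill_one_ship_go (pvDelKey (p :: r) name) weight limit loaded := by
  rw [fill_one_ship_go, if_pos ⟨hw, by simp⟩, hmax]
  split
  · rename_i heq; cases heq
  · rename_i fat' heq
    injection heq with h1; subst h1
    rw [hidx]
    split
    · rename_i heq; cases heq
    · rename_i i' heq
      injection heq with h2; subst h2
      split
      · rename_i heq; rw [hget] at heq; cases heq
      · rename_i name' heq
        rw [hget] at heq; injection heq with h3; subst h3
        rfl

-- main loop invariant: A's loop = B's scan of the stable descending sort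
theorem pvGo_eq_scan (n : Nat) (h : List (String × Int)) (hn : h.length = n)
    (hnd : (h.map Prod.fst).Nodup) (weight limit : Int) (loaded : List String) :
    fill_one_ship_go h weight limit loaded
      = fill_one_ship_scan (PySem.List.sorted h (fun kv => kv.2) true) weight limit loaded := by
  induction n generalizing h weight loaded with
  | zero =>
    have : h = [] := List.length_eq_zero_iff.mp hn
    subst this
    rw [fill_one_ship_go]
    simp only [List.length_nil, lt_irrefl, and_false, if_false]
    rfl
  | succ m ih =>
    obtain ⟨p, r, rfl⟩ : ∃ p r, h = p :: r := by
      cases h with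
      | nil => simp at hn
      | cons p r => exact ⟨p, r, rfl⟩
    obtain ⟨i, hmax, hidx, hget, hrm⟩ := pvChain p r
    rw [pvSorted_cons]
    by_cases hw : weight < limit
    · rw [pvGo_step p r weight limit loaded _ i _ hw hmax hidx hget]
      have hdel : pvDelKey (p :: r) (pvFm p r).1 = pvRmv p r := by
        rw [pvDelKey_eraseIdx (p :: r) i (pvFm p r).1 hnd hget, hrm]
      have hlen : (pvRmv p r).length = m := by
        rw [← hrm]
        have hi : i < (p :: r).length := by
          have := List.getElem?_eq_some_iff.mp hget
          simpa using this.1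
        simp only [List.length_eraseIdx, if_pos hi] at *
        omega
      have hnd' : ((pvRmv p r).map Prod.fst).Nodup :=
        List.Nodup.sublist (List.Sublist.map _ (pvRmv_sublist p r)) hnd
      simp only [fill_one_ship_scan, if_neg (by omega : ¬ limit ≤ weight)]
      by_cases hf : (pvFm p r).2 + weight ≤ limit
      · rw [if_pos hf, if_pos (by omega : weight + (pvFm p r).2 ≤ limit), hdel]
        exact ih _ hlen hnd' _ _
      · rw [if_neg hf, if_neg (by omega : ¬ weight + (pvFm p r).2 ≤ limit), hdel]
        exact ih _ hlen hnd' _ _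
    · rw [fill_one_ship_go, if_neg (by simp [hw])]
      simp [fill_one_ship_scan, if_pos (by omega : limit ≤ weight)]

-- ===== VERDICT (by name: the statement is the Claim_ definition above) =====
theorem fill_one_ship_spec : Claim_equal_fill_one_ship := by
  intro cows limit _ hpre
  show fill_one_ship cows limit = fill_one_ship_alt cows limit
  exact pvGo_eq_scan cows.length cows rfl hpre 0 limit []
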